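-- pv_equiv track=rewrite | github.com/myleveliszero/leetcode | 2023/Basics/FindTheHighestAltitude_1732.py | version2
-- ===== SOURCE A (Python) =====
-- def version2(gain):
--     cur = 0
--     answmax = 0
--     for g in gain:
--         cur += g
--         if answmax < cur:
--             answmax = cur
--     return answmax
-- ===== SOURCE B (Python) =====
-- def version2(gain):
--     # Backward dynamic programming: m is the highest altitude reachable over
--     # the remaining suffix, relative to the current position (m = max(0, g + m)).
--     m = 0
--     for g in reversed(gain):
--         m = max(0, g + m)
--     return m
-- ===== Notes on version B (the rewrite author's own statement) =====
-- stated objective: alternative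
-- what changed: Replaces A's forward scan maintaining a running prefix sum and its running max by a backward dynamic-programming recurrence over the reversed list (m = max(0, g + m)), which computes the best relative altitude of each suffix and never forms a prefix sum.
import Mathlib
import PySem

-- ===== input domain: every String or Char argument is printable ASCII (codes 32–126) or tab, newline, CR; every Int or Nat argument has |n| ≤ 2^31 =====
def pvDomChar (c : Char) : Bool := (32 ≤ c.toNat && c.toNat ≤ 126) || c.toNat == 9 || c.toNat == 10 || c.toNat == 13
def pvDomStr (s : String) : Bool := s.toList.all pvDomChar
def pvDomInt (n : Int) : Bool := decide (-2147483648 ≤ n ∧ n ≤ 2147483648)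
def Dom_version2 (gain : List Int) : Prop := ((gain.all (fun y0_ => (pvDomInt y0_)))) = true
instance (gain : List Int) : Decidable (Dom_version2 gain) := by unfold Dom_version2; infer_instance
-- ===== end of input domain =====

-- B uses a backward DP recurrence m = max(0, g + m) over the reversed list instead of A's forward prefix-sum running-max scan; objective: alternative, same cost.


-- ===== PORT A =====
def version2 (gain : List Int) : Int :=
  (gain.foldl (fun s g =>
      let cur := s.1 + g
      (cur, if s.2 < cur then cur else s.2)) (0, 0)).2

-- ===== PORT B =====
-- for g in reversed(gain): m = max(0, g + m)
def version2_alt (gain : List Int) : Int :=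
  gain.reverse.foldl (fun m g => max 0 (g + m)) 0

-- ===== PRECONDITION & SPEC =====
def Spec_version2 (gain : List Int) (out : Int) : Prop := out = version2_alt gain
instance (gain : List Int) (out : Int) : Decidable (Spec_version2 gain out) := by unfold Spec_version2; infer_instance

-- ===== CLAIM (what is proved, stated in full; the proofs are below) =====
def Claim_equal_version2 : Prop := ∀ (gain : List Int), Dom_version2 gain → Spec_version2 gain (version2 gain)

-- ===== LEMMAS AND PROOFS =====

-- ===== VERDICT (by name: the statement is the Claim_ definition above) =====
/-- B as a right fold (reversed-list left fold unfolded). -/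
lemma alt_eq_foldr (gain : List Int) :
    version2_alt gain = gain.foldr (fun g m => max 0 (g + m)) 0 := by
  unfold version2_alt
  rw [List.foldl_reverse]

lemma foldr_nonneg (gain : List Int) :
    0 ≤ gain.foldr (fun g m => max 0 (g + m)) 0 := by
  cases gain with
  | nil => simp
  | cons g t => simp

/-- A's fused fold from state (cur, ans) with cur ≤ ans equals
    max ans (cur + suffix DP value). -/
lemma foldA_eq (gain : List Int) (cur ans : Int) (h : cur ≤ ans) :
    (gain.foldl (fun s g =>
        let cur := s.1 + g
        (cur, if s.2 < cur then cur else s.2)) (cur, ans)).2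
      = max ans (cur + gain.foldr (fun g m => max 0 (g + m)) 0) := by
  induction gain generalizing cur ans with
  | nil => simp; omega
  | cons g t ih =>
      simp only [List.foldl_cons, List.foldr_cons]
      have hR := foldr_nonneg t
      rw [ih (cur + g) (if ans < cur + g then cur + g else ans) (by split <;> omega)]
      split <;> omega

-- ===== VERDICT (by name: the statement is the Claim_ definition above) =====
theorem version2_spec : Claim_equal_version2 := by
  intro gain _
  unfold Spec_version2 version2
  rw [alt_eq_foldr, foldA_eq gain 0 0 le_rfl]
  have := foldr_nonneg gain
  omega
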